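-- pv_equiv track=rewrite | github.com/ckoons/BubbleSpacetimeTheory | play/toy_308_a12_cascade_wall.py | build_spectrum
-- ===== SOURCE A (Python) =====
-- def _dim_B(p, q, r):
--     """Dimension of SO(2r+1) rep with highest weight (p, q, 0, ..., 0)."""
--     lam = [0] * (r + 1)
--     lam[1] = p; lam[2] = q
--     L = [0] * (r + 1); P = [0] * (r + 1)
--     for i in range(1, r + 1):
--         P[i] = 2 * r - 2 * i + 1
--         L[i] = 2 * lam[i] + P[i]
--     num = den = 1
--     for i in range(1, r + 1):
--         for j in range(i + 1, r + 1):
--             num *= (L[i]**2 - L[j]**2)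
--             den *= (P[i]**2 - P[j]**2)
--     for i in range(1, r + 1):
--         num *= L[i]; den *= P[i]
--     return num // den
--
-- def _dim_D(p, q, r):
--     """Dimension of SO(2r) rep with highest weight (p, q, 0, ..., 0)."""
--     lam = [0] * (r + 1)
--     lam[1] = p; lam[2] = q
--     l = [0] * (r + 1); rho = [0] * (r + 1)
--     for i in range(1, r + 1):
--         rho[i] = r - i; l[i] = lam[i] + rho[i]
--     num = den = 1
--     for i in range(1, r + 1):
--         for j in range(i + 1, r + 1):
--             num *= (l[i]**2 - l[j]**2)
--             d = rho[i]**2 - rho[j]**2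
--             if d == 0: return 0
--             den *= d
--     return num // den
--
-- def dim_SO(p, q, N):
--     if N < 5: raise ValueError(f"Need N >= 5, got {N}")
--     return _dim_B(p, q, (N - 1) // 2) if N % 2 == 1 else _dim_D(p, q, N // 2)
--
-- def build_spectrum(n, P_max=700):
--     """Aggregated spectrum: (eigenvalues, multiplicities) as int lists."""
--     N = n + 2
--     spec = {}
--     for p in range(P_max):
--         for q in range(p + 1):
--             lam = p * (p + n) + q * (q + n - 2)
--             d = dim_SO(p, q, N)
--             if d > 0:
--                 spec[lam] = spec.get(lam, 0) + d
--     items = sorted(spec.items())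
--     return [lam for lam, _ in items], [d for _, d in items]
-- ===== SOURCE B (Python) =====
-- def build_spectrum(n, P_max=700):
--     """Aggregated spectrum: (eigenvalues, multiplicities) as int lists.
--
--     Same result as the original, but the Weyl dimension product is reduced
--     analytically: since only the first two entries of the highest weight are
--     nonzero, every pairwise factor with both indices >= 3 cancels between
--     numerator and denominator, leaving O(r) varying factors per (p, q); the
--     constant factors are hoisted out of the (p, q) loops.
--     """
--     if P_max <= 0:
--         return [], []
--     N = n + 2
--     if N < 5:
--         raise ValueError(f"Need N >= 5, got {N}")
--     if N % 2 == 1: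
--         r = (N - 1) // 2
--         c1, c2 = 2 * r - 1, 2 * r - 3          # P_1, P_2
--         s = 2                                   # L_i = 2*lam_i + P_i
--         tail = [(2 * r - 2 * j + 1) ** 2 for j in range(3, r + 1)]
--         diag = True                             # B-series has the extra L_i/P_i factors
--     else:
--         r = N // 2
--         c1, c2 = r - 1, r - 2                   # rho_1, rho_2
--         s = 1                                   # l_i = lam_i + rho_i
--         tail = [(r - j) ** 2 for j in range(3, r + 1)]
--         diag = False
--     # denominator: constant over the whole spectrum
--     den = c1 * c1 - c2 * c2
--     for t in tail:
--         den *= (c1 * c1 - t) * (c2 * c2 - t)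
--     if diag:
--         den *= c1 * c2
--     spec = {}
--     for p in range(P_max):
--         x1 = s * p + c1
--         for q in range(p + 1):
--             x2 = s * q + c2
--             num = x1 * x1 - x2 * x2
--             for t in tail:
--                 num *= (x1 * x1 - t) * (x2 * x2 - t)
--             if diag:
--                 num *= x1 * x2
--             d = num // den
--             if d > 0:
--                 lam = p * (p + n) + q * (q + n - 2)
--                 spec[lam] = spec.get(lam, 0) + d
--     items = sorted(spec.items())
--     return [lam for lam, _ in items], [d for _, d in items]
-- ===== Notes on version B (the rewrite author's own statement) =====
-- stated objective: faster
-- what changed: B cancels analytically the Weyl-dimension product factors with both indices >= 3 (identical in numerator and denominator because only the first two weight entries are nonzero), leaving O(r) varying factors per (p,q), and hoists the constant denominator and tail out of the (p,q) loops, instead of A's O(r^2) pairwise product per (p,q).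
import Mathlib
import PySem

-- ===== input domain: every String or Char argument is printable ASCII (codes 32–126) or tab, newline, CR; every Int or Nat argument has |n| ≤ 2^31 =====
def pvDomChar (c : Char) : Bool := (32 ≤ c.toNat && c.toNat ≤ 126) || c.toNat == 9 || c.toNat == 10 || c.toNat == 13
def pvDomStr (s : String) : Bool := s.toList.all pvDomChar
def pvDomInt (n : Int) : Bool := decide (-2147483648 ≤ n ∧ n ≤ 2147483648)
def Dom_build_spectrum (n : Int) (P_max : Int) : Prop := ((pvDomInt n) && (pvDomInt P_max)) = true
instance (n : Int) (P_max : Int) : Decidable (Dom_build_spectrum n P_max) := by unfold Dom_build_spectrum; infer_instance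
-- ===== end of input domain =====

-- B replaces the O(r^2)-factor Weyl dimension product by the O(r) product left after cancelling
-- the pairwise factors with both indices ≥ 3 (equal in numerator and denominator), and hoists the
-- constant denominator out of the (p, q) loops; the aggregation and output shape are unchanged.

-- ===== PORT A =====

-- _dim_B(p, q, r): lists lam/L/P built by index assignment, then the nested product loops.
def dim_B (p q r : Int) : Int :=
  let lam0 : List Int := List.replicate (r + 1).toNat 0          -- [0] * (r + 1)
  let lam := PySem.List.pySetD (PySem.List.pySetD lam0 1 p) 2 q  -- lam[1] = p; lam[2] = q  (in range under Pre_)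
  let L0 : List Int := List.replicate (r + 1).toNat 0
  let P0 : List Int := List.replicate (r + 1).toNat 0
  let LP := (PySem.List.pyRange 1 (r + 1)).foldl (fun (st : List Int × List Int) i =>
      let P' := PySem.List.pySetD st.2 i (2 * r - 2 * i + 1)
      let L' := PySem.List.pySetD st.1 i (2 * PySem.List.pyGetD lam i 0 + PySem.List.pyGetD P' i 0)
      (L', P')) (L0, P0)
  let L := LP.1
  let P := LP.2
  let nd := (PySem.List.pyRange 1 (r + 1)).foldl (fun (nd : Int × Int) i =>
      (PySem.List.pyRange (i + 1) (r + 1)).foldl (fun (nd : Int × Int) j =>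
        (nd.1 * ((PySem.List.pyGetD L i 0) ^ 2 - (PySem.List.pyGetD L j 0) ^ 2),
         nd.2 * ((PySem.List.pyGetD P i 0) ^ 2 - (PySem.List.pyGetD P j 0) ^ 2))) nd) (1, 1)
  let nd := (PySem.List.pyRange 1 (r + 1)).foldl (fun (nd : Int × Int) i =>
      (nd.1 * PySem.List.pyGetD L i 0, nd.2 * PySem.List.pyGetD P i 0)) nd
  PySem.Int.floordiv nd.1 nd.2

-- _dim_D(p, q, r): the early 'return 0' on d == 0 is an Option state (none = returned 0).
def dim_D (p q r : Int) : Int :=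
  let lam0 : List Int := List.replicate (r + 1).toNat 0
  let lam := PySem.List.pySetD (PySem.List.pySetD lam0 1 p) 2 q
  let l0 : List Int := List.replicate (r + 1).toNat 0
  let rho0 : List Int := List.replicate (r + 1).toNat 0
  let lrho := (PySem.List.pyRange 1 (r + 1)).foldl (fun (st : List Int × List Int) i =>
      (PySem.List.pySetD st.1 i (PySem.List.pyGetD lam i 0 + (r - i)),
       PySem.List.pySetD st.2 i (r - i))) (l0, rho0)
  let l := lrho.1
  let rho := lrho.2
  let nd := (PySem.List.pyRange 1 (r + 1)).foldl (fun (nd : Option (Int × Int)) i =>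
      (PySem.List.pyRange (i + 1) (r + 1)).foldl (fun (nd : Option (Int × Int)) j =>
        match nd with
        | none => none
        | some (num, den) =>
          let d := (PySem.List.pyGetD rho i 0) ^ 2 - (PySem.List.pyGetD rho j 0) ^ 2
          if d = 0 then none
          else some (num * ((PySem.List.pyGetD l i 0) ^ 2 - (PySem.List.pyGetD l j 0) ^ 2), den * d)) nd)
      (some (1, 1))
  match nd with
  | none => 0
  | some (num, den) => PySem.Int.floordiv num den

-- dim_SO(p, q, N); the 'raise ValueError' branch (N < 5) is excluded by Pre_build_spectrum.
def dim_SO (p q N : Int) : Int :=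
  if PySem.Int.mod N 2 = 1 then dim_B p q (PySem.Int.floordiv (N - 1) 2)
  else dim_D p q (PySem.Int.floordiv N 2)

def build_spectrum (n : Int) (P_max : Int) : List Int × List Int :=
  let N := n + 2
  let spec : PySem.Dict Int Int := (PySem.List.pyRange 0 P_max).foldl (fun spec p =>
      (PySem.List.pyRange 0 (p + 1)).foldl (fun (spec : PySem.Dict Int Int) q =>
        let lam := p * (p + n) + q * (q + n - 2)
        let d := dim_SO p q N
        if d > 0 then spec.insert lam (spec.getD lam 0 + d) else spec) spec)
    PySem.Dict.empty
  -- sorted(spec.items()): tuple comparison; dict keys are distinct, so it is the (fst, snd) lexicographic sort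
  let items := PySem.List.sorted2 spec.items Prod.fst Prod.snd
  (items.map Prod.fst, items.map Prod.snd)

-- ===== PORT B =====

-- the reduced numerator: (x1^2 - x2^2) * prod_{t in tail} (x1^2 - t)(x2^2 - t) [* x1*x2 for the B series]
def altNum (x1 x2 : Int) (tail : List Int) (diag : Bool) : Int :=
  let num := tail.foldl (fun m t => m * ((x1 * x1 - t) * (x2 * x2 - t))) (x1 * x1 - x2 * x2)
  if diag then num * (x1 * x2) else num

def build_spectrum_alt (n : Int) (P_max : Int) : List Int × List Int :=
  if P_max ≤ 0 then ([], [])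
  else
    let N := n + 2
    -- the 'raise ValueError' branch (N < 5) is excluded by Pre_build_spectrum
    let rc :=
      if PySem.Int.mod N 2 = 1 then
        let r := PySem.Int.floordiv (N - 1) 2
        (r, 2 * r - 1, 2 * r - 3, (2 : Int),
         (PySem.List.pyRange 3 (r + 1)).map (fun j => (2 * r - 2 * j + 1) ^ 2), true)
      else
        let r := PySem.Int.floordiv N 2
        (r, r - 1, r - 2, (1 : Int),
         (PySem.List.pyRange 3 (r + 1)).map (fun j => (r - j) ^ 2), false)
    let c1 := rc.2.1
    let c2 := rc.2.2.1
    let s := rc.2.2.2.1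
    let tail := rc.2.2.2.2.1
    let diag := rc.2.2.2.2.2
    let den := altNum c1 c2 tail diag
    let spec : PySem.Dict Int Int := (PySem.List.pyRange 0 P_max).foldl (fun spec p =>
        let x1 := s * p + c1
        (PySem.List.pyRange 0 (p + 1)).foldl (fun (spec : PySem.Dict Int Int) q =>
          let x2 := s * q + c2
          let d := PySem.Int.floordiv (altNum x1 x2 tail diag) den
          if d > 0 then
            let lam := p * (p + n) + q * (q + n - 2)
            spec.insert lam (spec.getD lam 0 + d)
          else spec) spec)
      PySem.Dict.empty
    let items := PySem.List.sorted2 spec.items Prod.fst Prod.snd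
    (items.map Prod.fst, items.map Prod.snd)

-- ===== PRECONDITION & SPEC =====
-- A raises ValueError (from dim_SO, needing N = n + 2 >= 5) as soon as the loop body runs:
-- excluded are exactly the inputs with P_max >= 1 and n < 3, on which both A and B raise.
def Pre_build_spectrum (n : Int) (P_max : Int) : Prop := P_max ≤ 0 ∨ 3 ≤ n
instance (n : Int) (P_max : Int) : Decidable (Pre_build_spectrum n P_max) := by
  unfold Pre_build_spectrum; infer_instance

def pvWitness_build_spectrum : Int × Int := (3, 2)

def Spec_build_spectrum (n : Int) (P_max : Int) (out : List Int × List Int) : Prop :=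
  out = build_spectrum_alt n P_max
instance (n : Int) (P_max : Int) (out : List Int × List Int) : Decidable (Spec_build_spectrum n P_max out) := by
  unfold Spec_build_spectrum; infer_instance

-- ===== CLAIM (what is proved, stated in full; the proofs are below) =====
def Claim_equal_build_spectrum : Prop := ∀ (n : Int) (P_max : Int), Dom_build_spectrum n P_max → Pre_build_spectrum n P_max → Spec_build_spectrum n P_max (build_spectrum n P_max)

-- ===== LEMMAS AND PROOFS =====

-- abbreviations for A's highest-weight data (proof-only)
def lamv (p q i : Int) : Int := if i = 1 then p else if i = 2 then q else 0

-- generic: a fold of multiplications is the initial value times a product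
theorem foldl_mul_map {α : Type} (l : List α) (f : α → Int) (a : Int) :
    l.foldl (fun s x => s * f x) a = a * (l.map f).prod := by
  induction l generalizing a with
  | nil => simp
  | cons x t ih => simp [ih, mul_assoc]

-- generic: an Option-state fold that never returns none is the plain fold
theorem foldl_option_some {α σ : Type} (l : List α) (step : Option σ → α → Option σ)
    (f : σ → α → σ) (h1 : ∀ s x, x ∈ l → step (some s) x = some (f s x)) (init : σ) :
    l.foldl step (some init) = some (l.foldl f init) := by
  induction l generalizing init with
  | nil => rfl
  | cons x t ih =>
      rw [List.foldl_cons, List.foldl_cons, h1 init x (List.mem_cons_self ..)]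
      exact ih (fun s y hy => h1 s y (List.mem_cons_of_mem _ hy)) _

theorem pyGetD_pySetD_int (xs : List Int) {i j : Int} (v d : Int) (h0 : 0 ≤ i)
    (hi : i < (xs.length : Int)) (h0j : 0 ≤ j) :
    PySem.List.pyGetD (PySem.List.pySetD xs i v) j d
      = if j = i then v else PySem.List.pyGetD xs j d := by
  rw [PySem.List.pySetD_of_nonneg xs v h0, PySem.List.pyGetD_of_nonneg _ d h0j,
    PySem.List.pyGetD_of_nonneg xs d h0j]
  simp only [List.getD, List.getElem?_set]
  by_cases hji : j = i
  · subst hji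
    simp [show j.toNat < xs.length by omega]
  · rw [if_neg (by omega), if_neg hji]

theorem pyGetD_replicate_zero {i : Int} (m : Nat) (h0 : 0 ≤ i) :
    PySem.List.pyGetD (List.replicate m (0 : Int)) i 0 = 0 := by
  rw [PySem.List.pyGetD_of_nonneg _ _ h0]
  by_cases h : i.toNat < m
  · simp [List.getD, h]
  · simp [List.getD, h]

-- the lam list of both _dim_B and _dim_D
theorem lam_get (p q r : Int) (hr : 2 ≤ r) {i : Int} (h1 : 1 ≤ i) :
    PySem.List.pyGetD
      (PySem.List.pySetD (PySem.List.pySetD (List.replicate (r + 1).toNat 0) 1 p) 2 q) i 0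
      = lamv p q i := by
  have hlen : ((List.replicate (r + 1).toNat (0 : Int)).length : Int) = r + 1 := by
    simp; omega
  rw [pyGetD_pySetD_int _ _ _ (by omega) (by rw [PySem.List.length_pySetD]; omega) (by omega),
    pyGetD_pySetD_int _ _ _ (by omega) (by omega) (by omega)]
  unfold lamv
  by_cases h2 : i = 2
  · simp [h2]
  · by_cases h1' : i = 1
    · simp [h1']
    · simp [h2, h1', pyGetD_replicate_zero _ (by omega : (0:Int) ≤ i)]

-- generic invariant for the build loops: the fold over range(1, k) sets slot i of the
-- first list to F i and of the second to G i
theorem fold_set2_spec {F G : Int → Int} (len : Nat)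
    (step : List Int × List Int → Int → List Int × List Int)
    (hstep : ∀ st i, st.1.length = len → st.2.length = len → 0 ≤ i → i < (len : Int) →
      step st i = (PySem.List.pySetD st.1 i (F i), PySem.List.pySetD st.2 i (G i)))
    (init1 init2 : List Int) (hi1 : init1.length = len) (hi2 : init2.length = len)
    (k : Int) (h1 : 1 ≤ k) (hk : k ≤ (len : Int)) :
    ((PySem.List.pyRange 1 k).foldl step (init1, init2)).1.length = len ∧
    ((PySem.List.pyRange 1 k).foldl step (init1, init2)).2.length = len ∧
    ∀ i : Int, 1 ≤ i → i < k →
      PySem.List.pyGetD ((PySem.List.pyRange 1 k).foldl step (init1, init2)).1 i 0 = F i ∧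
      PySem.List.pyGetD ((PySem.List.pyRange 1 k).foldl step (init1, init2)).2 i 0 = G i := by
  induction k, h1 using Int.le_induction with
  | base =>
      rw [PySem.List.pyRange_one_eq_nil (by omega)]
      exact ⟨hi1, hi2, fun i hi1' hi2' => absurd (lt_of_lt_of_le hi2' hi1') (lt_irrefl i)⟩
  | succ k hk1 ih =>
      obtain ⟨l1, l2, hv⟩ := ih (by omega)
      rw [PySem.List.pyRange_one_succ_right (by omega), List.foldl_append, List.foldl_cons,
        List.foldl_nil]
      set st := (PySem.List.pyRange 1 k).foldl step (init1, init2) with hst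
      rw [hstep st k l1 l2 (by omega) (by omega)]
      refine ⟨by simp [PySem.List.length_pySetD, l1], by simp [PySem.List.length_pySetD, l2], ?_⟩
      intro i hi1' hi2'
      by_cases hik : i = k
      · subst hik
        constructor <;>
          rw [pyGetD_pySetD_int _ _ _ (by omega) (by omega) (by omega), if_pos rfl]
      · have h := hv i hi1' (by omega)
        constructor <;>
          rw [pyGetD_pySetD_int _ _ _ (by omega) (by omega) (by omega), if_neg hik] <;>
          [exact h.1; exact h.2]

-- abstract forms of the Weyl products
def pairProd (f : Int → Int) (r : Int) : Int :=
  ((PySem.List.pyRange 1 (r + 1)).map (fun i =>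
    ((PySem.List.pyRange (i + 1) (r + 1)).map (fun j => f i ^ 2 - f j ^ 2)).prod)).prod

def diagProd (f : Int → Int) (r : Int) : Int :=
  ((PySem.List.pyRange 1 (r + 1)).map f).prod

def restProd (g : Int → Int) (r : Int) : Int :=
  ((PySem.List.pyRange 3 (r + 1)).map (fun i =>
    ((PySem.List.pyRange (i + 1) (r + 1)).map (fun j => g i ^ 2 - g j ^ 2)).prod)).prod

def colProd (g : Int → Int) (x r : Int) : Int :=
  ((PySem.List.pyRange 3 (r + 1)).map (fun j => x ^ 2 - g j ^ 2)).prod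

def tailProd (g : Int → Int) (r : Int) : Int :=
  ((PySem.List.pyRange 3 (r + 1)).map g).prod

theorem pairProd_split (f g : Int → Int) (r : Int) (hr : 2 ≤ r)
    (hfg : ∀ i, 3 ≤ i → f i = g i) :
    pairProd f r = ((f 1 ^ 2 - f 2 ^ 2) * colProd g (f 1) r * colProd g (f 2) r) * restProd g r := by
  unfold pairProd colProd restProd
  rw [PySem.List.pyRange_one_cons (by omega : (1:Int) < r + 1)]
  simp only [List.map_cons, List.prod_cons, show (1:Int) + 1 = 2 from by norm_num]
  rw [PySem.List.pyRange_one_cons (by omega : (2:Int) < r + 1)]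
  simp only [List.map_cons, List.prod_cons, show (2:Int) + 1 = 3 from by norm_num]
  rw [List.map_congr_left (l := PySem.List.pyRange 3 (r+1))
        (f := fun j => f 1 ^ 2 - f j ^ 2) (g := fun j => f 1 ^ 2 - g j ^ 2)
        (fun j hj => by simp only [hfg j (PySem.List.mem_pyRange_one.mp hj).1]),
      List.map_congr_left (l := PySem.List.pyRange 3 (r+1))
        (f := fun j => f 2 ^ 2 - f j ^ 2) (g := fun j => f 2 ^ 2 - g j ^ 2)
        (fun j hj => by simp only [hfg j (PySem.List.mem_pyRange_one.mp hj).1]),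
      List.map_congr_left (l := PySem.List.pyRange 3 (r+1))
        (f := fun i => ((PySem.List.pyRange (i + 1) (r + 1)).map (fun j => f i ^ 2 - f j ^ 2)).prod)
        (g := fun i => ((PySem.List.pyRange (i + 1) (r + 1)).map (fun j => g i ^ 2 - g j ^ 2)).prod)
        (fun i hi => by
          have h3 : 3 ≤ i := (PySem.List.mem_pyRange_one.mp hi).1
          simp only [hfg i h3]
          exact congrArg List.prod (List.map_congr_left (fun j hj => by
            simp only [hfg j (by have := (PySem.List.mem_pyRange_one.mp hj).1; omega)])))]
  ring

theorem diagProd_split (f g : Int → Int) (r : Int) (hr : 2 ≤ r)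
    (hfg : ∀ i, 3 ≤ i → f i = g i) :
    diagProd f r = (f 1 * f 2) * tailProd g r := by
  unfold diagProd tailProd
  rw [PySem.List.pyRange_one_cons (by omega : (1:Int) < r + 1),
    show (1:Int) + 1 = 2 by norm_num,
    PySem.List.pyRange_one_cons (by omega : (2:Int) < r + 1),
    show (2:Int) + 1 = 3 by norm_num]
  simp only [List.map_cons, List.prod_cons]
  rw [List.map_congr_left (fun j hj => hfg j (PySem.List.mem_pyRange_one.mp hj).1)]
  ring

theorem altNum_closed (x1 x2 r : Int) (g : Int → Int) (diag : Bool) :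
    altNum x1 x2 ((PySem.List.pyRange 3 (r + 1)).map (fun j => g j ^ 2)) diag
      = ((x1 ^ 2 - x2 ^ 2) * colProd g x1 r * colProd g x2 r) * (if diag then x1 * x2 else 1) := by
  unfold altNum colProd
  rw [List.foldl_map, foldl_mul_map]
  have : ((PySem.List.pyRange 3 (r + 1)).map
        (fun j => (x1 * x1 - g j ^ 2) * (x2 * x2 - g j ^ 2))).prod
      = ((PySem.List.pyRange 3 (r + 1)).map (fun j => x1 ^ 2 - g j ^ 2)).prod
        * ((PySem.List.pyRange 3 (r + 1)).map (fun j => x2 ^ 2 - g j ^ 2)).prod := by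
    rw [← List.prod_map_mul]
    exact congrArg List.prod (List.map_congr_left (fun j _ => by ring))
  rw [this]
  cases diag
  · rw [if_neg (show ¬(false = true) from by simp), if_neg (show ¬(false = true) from by simp),
      mul_one]
    ring
  · rw [if_pos rfl, if_pos rfl]
    ring

theorem floordiv_mul_cancel (a b k : Int) (hb : 0 < b) (hk : 0 < k) :
    PySem.Int.floordiv (a * k) (b * k) = PySem.Int.floordiv a b := by
  rw [PySem.Int.floordiv_eq_ediv_of_pos (mul_pos hb hk), PySem.Int.floordiv_eq_ediv_of_pos hb,
    mul_comm a k, mul_comm b k, Int.mul_ediv_mul_of_pos _ _ hk]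

theorem colProd_pos (g : Int → Int) (x r : Int)
    (h : ∀ j, 3 ≤ j → j ≤ r → g j ^ 2 < x ^ 2) : 0 < colProd g x r := by
  unfold colProd
  apply List.prod_pos
  intro a ha
  obtain ⟨j, hj, rfl⟩ := List.mem_map.mp ha
  obtain ⟨hj1, hj2⟩ := PySem.List.mem_pyRange_one.mp hj
  exact sub_pos.mpr (h j hj1 (by omega))

theorem restProd_pos (g : Int → Int) (r : Int)
    (h : ∀ i j, 3 ≤ i → i < j → j ≤ r → g j ^ 2 < g i ^ 2) : 0 < restProd g r := by
  unfold restProd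
  apply List.prod_pos
  intro a ha
  obtain ⟨i, hi, rfl⟩ := List.mem_map.mp ha
  obtain ⟨hi1, hi2⟩ := PySem.List.mem_pyRange_one.mp hi
  apply List.prod_pos
  intro b hb
  obtain ⟨j, hj, rfl⟩ := List.mem_map.mp hb
  obtain ⟨hj1, hj2⟩ := PySem.List.mem_pyRange_one.mp hj
  exact sub_pos.mpr (h i j hi1 (by omega) (by omega))

theorem tailProd_pos (g : Int → Int) (r : Int)
    (h : ∀ j, 3 ≤ j → j ≤ r → 0 < g j) : 0 < tailProd g r := by
  unfold tailProd
  apply List.prod_pos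
  intro a ha
  obtain ⟨j, hj, rfl⟩ := List.mem_map.mp ha
  obtain ⟨hj1, hj2⟩ := PySem.List.mem_pyRange_one.mp hj
  exact h j hj1 (by omega)

-- the pair-state double loop computes the pair of double products
theorem pairs_fold_eq (f g : Int → Int) (r : Int) :
    (PySem.List.pyRange 1 (r + 1)).foldl (fun (nd : Int × Int) i =>
        (PySem.List.pyRange (i + 1) (r + 1)).foldl (fun (nd : Int × Int) j =>
          (nd.1 * (f i ^ 2 - f j ^ 2), nd.2 * (g i ^ 2 - g j ^ 2))) nd) (1, 1)
      = (pairProd f r, pairProd g r) := by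
  rw [PySem.List.foldl_congr_mem _ _ (fun (nd : Int × Int) i =>
      (nd.1 * ((PySem.List.pyRange (i + 1) (r + 1)).map (fun j => f i ^ 2 - f j ^ 2)).prod,
       nd.2 * ((PySem.List.pyRange (i + 1) (r + 1)).map (fun j => g i ^ 2 - g j ^ 2)).prod)) _
      (fun acc i _ => by
        obtain ⟨a, b⟩ := acc
        rw [PySem.List.foldl_prod_mk (f := fun (a : Int) j => a * (f i ^ 2 - f j ^ 2))
            (g := fun (b : Int) j => b * (g i ^ 2 - g j ^ 2)), foldl_mul_map, foldl_mul_map])]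
  rw [PySem.List.foldl_prod_mk
      (f := fun (a : Int) i => a * ((PySem.List.pyRange (i + 1) (r + 1)).map (fun j => f i ^ 2 - f j ^ 2)).prod)
      (g := fun (b : Int) i => b * ((PySem.List.pyRange (i + 1) (r + 1)).map (fun j => g i ^ 2 - g j ^ 2)).prod),
    foldl_mul_map, foldl_mul_map, one_mul, one_mul]
  rfl

-- the diagonal loop multiplies in the pair of simple products
theorem diag_fold_eq (L P : List Int) (f g : Int → Int) (r : Int) (nd : Int × Int)
    (hL : ∀ i, 1 ≤ i → i ≤ r → PySem.List.pyGetD L i 0 = f i)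
    (hP : ∀ i, 1 ≤ i → i ≤ r → PySem.List.pyGetD P i 0 = g i) :
    (PySem.List.pyRange 1 (r + 1)).foldl (fun (nd : Int × Int) i =>
        (nd.1 * PySem.List.pyGetD L i 0, nd.2 * PySem.List.pyGetD P i 0)) nd
      = (nd.1 * diagProd f r, nd.2 * diagProd g r) := by
  rw [PySem.List.foldl_congr_mem _ _ (fun (nd : Int × Int) i => (nd.1 * f i, nd.2 * g i)) _
      (fun acc i hi => by
        obtain ⟨hi1, hi2⟩ := PySem.List.mem_pyRange_one.mp hi
        rw [hL i hi1 (by omega), hP i hi1 (by omega)])]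
  obtain ⟨a, b⟩ := nd
  rw [PySem.List.foldl_prod_mk (f := fun (a : Int) i => a * f i) (g := fun (b : Int) i => b * g i),
    foldl_mul_map, foldl_mul_map]
  rfl

-- the pyGetD-reading double loop of _dim_B
theorem ndB_fold_eq (L P : List Int) (f g : Int → Int) (r : Int)
    (hL : ∀ i, 1 ≤ i → i ≤ r → PySem.List.pyGetD L i 0 = f i)
    (hP : ∀ i, 1 ≤ i → i ≤ r → PySem.List.pyGetD P i 0 = g i) :
    (PySem.List.pyRange 1 (r + 1)).foldl (fun (nd : Int × Int) i =>
        (PySem.List.pyRange (i + 1) (r + 1)).foldl (fun (nd : Int × Int) j =>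
          (nd.1 * ((PySem.List.pyGetD L i 0) ^ 2 - (PySem.List.pyGetD L j 0) ^ 2),
           nd.2 * ((PySem.List.pyGetD P i 0) ^ 2 - (PySem.List.pyGetD P j 0) ^ 2))) nd) (1, 1)
      = (pairProd f r, pairProd g r) := by
  rw [PySem.List.foldl_congr_mem _ _ (fun (nd : Int × Int) i =>
      (PySem.List.pyRange (i + 1) (r + 1)).foldl (fun (nd : Int × Int) j =>
        (nd.1 * (f i ^ 2 - f j ^ 2), nd.2 * (g i ^ 2 - g j ^ 2))) nd) _
      (fun acc i hi => by
        obtain ⟨hi1, hi2⟩ := PySem.List.mem_pyRange_one.mp hi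
        exact PySem.List.foldl_congr_mem _ _ _ _ (fun acc' j hj => by
          obtain ⟨hj1, hj2⟩ := PySem.List.mem_pyRange_one.mp hj
          rw [hL i hi1 (by omega), hL j (by omega) (by omega),
            hP i hi1 (by omega), hP j (by omega) (by omega)]))]
  exact pairs_fold_eq f g r

-- the Option-state double loop of _dim_D never takes the d == 0 exit
theorem ndD_fold_eq (L P : List Int) (f g : Int → Int) (r : Int)
    (hL : ∀ i, 1 ≤ i → i ≤ r → PySem.List.pyGetD L i 0 = f i)
    (hP : ∀ i, 1 ≤ i → i ≤ r → PySem.List.pyGetD P i 0 = g i)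
    (hd : ∀ i j, 1 ≤ i → i < j → j ≤ r → g i ^ 2 - g j ^ 2 ≠ 0) :
    (PySem.List.pyRange 1 (r + 1)).foldl (fun (nd : Option (Int × Int)) i =>
        (PySem.List.pyRange (i + 1) (r + 1)).foldl (fun (nd : Option (Int × Int)) j =>
          match nd with
          | none => none
          | some (num, den) =>
            let d := (PySem.List.pyGetD P i 0) ^ 2 - (PySem.List.pyGetD P j 0) ^ 2
            if d = 0 then none
            else some (num * ((PySem.List.pyGetD L i 0) ^ 2 - (PySem.List.pyGetD L j 0) ^ 2),
              den * d)) nd) (some (1, 1))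
      = some (pairProd f r, pairProd g r) := by
  rw [foldl_option_some _ _ (fun (nd : Int × Int) i =>
      (PySem.List.pyRange (i + 1) (r + 1)).foldl (fun (nd : Int × Int) j =>
        (nd.1 * (f i ^ 2 - f j ^ 2), nd.2 * (g i ^ 2 - g j ^ 2))) nd)
      (fun s i hi => by
        obtain ⟨hi1, hi2⟩ := PySem.List.mem_pyRange_one.mp hi
        exact foldl_option_some _ _ _ (fun t j hj => by
          obtain ⟨hj1, hj2⟩ := PySem.List.mem_pyRange_one.mp hj
          obtain ⟨num, den⟩ := t
          dsimp only
          rw [hL i hi1 (by omega), hL j (by omega) (by omega),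
            hP i hi1 (by omega), hP j (by omega) (by omega),
            if_neg (hd i j hi1 (by omega) (by omega))]) s)]
  rw [pairs_fold_eq f g r]

theorem floordiv_eq_of_factor (X Y Z W K : Int) (hx : X = Z * K) (hy : Y = W * K)
    (hw : 0 < W) (hk : 0 < K) : PySem.Int.floordiv X Y = PySem.Int.floordiv Z W := by
  rw [hx, hy]; exact floordiv_mul_cancel Z W K hw hk

theorem dimB_abs (p q r : Int) (hr : 2 ≤ r) :
    dim_B p q r
      = PySem.Int.floordiv
          (pairProd (fun i => 2 * lamv p q i + (2 * r - 2 * i + 1)) r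
            * diagProd (fun i => 2 * lamv p q i + (2 * r - 2 * i + 1)) r)
          (pairProd (fun i => 2 * r - 2 * i + 1) r * diagProd (fun i => 2 * r - 2 * i + 1) r) := by
  obtain ⟨hl1, hl2, hval⟩ := fold_set2_spec
      (F := fun i => 2 * PySem.List.pyGetD (PySem.List.pySetD (PySem.List.pySetD
        (List.replicate (r + 1).toNat 0) 1 p) 2 q) i 0 + (2 * r - 2 * i + 1))
      (G := fun i => 2 * r - 2 * i + 1) ((r + 1).toNat)
      (fun (st : List Int × List Int) i =>
        (PySem.List.pySetD st.1 i (2 * PySem.List.pyGetD (PySem.List.pySetD (PySem.List.pySetD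
            (List.replicate (r + 1).toNat 0) 1 p) 2 q) i 0
          + PySem.List.pyGetD (PySem.List.pySetD st.2 i (2 * r - 2 * i + 1)) i 0),
         PySem.List.pySetD st.2 i (2 * r - 2 * i + 1)))
      (fun st i h1 h2 h0 hi => by
        dsimp only
        rw [pyGetD_pySetD_int st.2 _ _ h0 (by omega) h0, if_pos rfl])
      (List.replicate (r + 1).toNat 0) (List.replicate (r + 1).toNat 0)
      List.length_replicate List.length_replicate (r + 1) (by omega) (by omega)
  simp only [dim_B]
  rw [ndB_fold_eq _ _ (fun i => 2 * lamv p q i + (2 * r - 2 * i + 1))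
      (fun i => 2 * r - 2 * i + 1) r
      (fun i h1 h2 => by
        rw [(hval i h1 (by omega)).1]
        dsimp only
        rw [lam_get p q r hr h1])
      (fun i h1 h2 => (hval i h1 (by omega)).2)]
  rw [diag_fold_eq _ _ (fun i => 2 * lamv p q i + (2 * r - 2 * i + 1))
      (fun i => 2 * r - 2 * i + 1) r _
      (fun i h1 h2 => by
        rw [(hval i h1 (by omega)).1]
        dsimp only
        rw [lam_get p q r hr h1])
      (fun i h1 h2 => (hval i h1 (by omega)).2)]

theorem dimD_abs (p q r : Int) (hr : 2 ≤ r) :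
    dim_D p q r
      = PySem.Int.floordiv (pairProd (fun i => lamv p q i + (r - i)) r)
          (pairProd (fun i => r - i) r) := by
  obtain ⟨hl1, hl2, hval⟩ := fold_set2_spec
      (F := fun i => PySem.List.pyGetD (PySem.List.pySetD (PySem.List.pySetD
        (List.replicate (r + 1).toNat 0) 1 p) 2 q) i 0 + (r - i))
      (G := fun i => r - i) ((r + 1).toNat)
      (fun (st : List Int × List Int) i =>
        (PySem.List.pySetD st.1 i (PySem.List.pyGetD (PySem.List.pySetD (PySem.List.pySetD
            (List.replicate (r + 1).toNat 0) 1 p) 2 q) i 0 + (r - i)),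
         PySem.List.pySetD st.2 i (r - i)))
      (fun st i h1 h2 h0 hi => rfl)
      (List.replicate (r + 1).toNat 0) (List.replicate (r + 1).toNat 0)
      List.length_replicate List.length_replicate (r + 1) (by omega) (by omega)
  simp only [dim_D]
  rw [ndD_fold_eq _ _ (fun i => lamv p q i + (r - i)) (fun i => r - i) r
      (fun i h1 h2 => by
        rw [(hval i h1 (by omega)).1]
        dsimp only
        rw [lam_get p q r hr h1])
      (fun i h1 h2 => (hval i h1 (by omega)).2)
      (fun i j h1 hij hj => by
        show (r - i) ^ 2 - (r - j) ^ 2 ≠ 0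
        have ha : (0:Int) ≤ r - j := by omega
        have hb : r - j < r - i := by omega
        have h2 : (r - j) ^ 2 < (r - i) ^ 2 := by nlinarith
        omega)]

theorem dimB_eq (p q r : Int) (hr : 2 ≤ r) :
    dim_B p q r = PySem.Int.floordiv
      (altNum (2 * p + (2 * r - 1)) (2 * q + (2 * r - 3))
        ((PySem.List.pyRange 3 (r + 1)).map (fun j => (2 * r - 2 * j + 1) ^ 2)) true)
      (altNum (2 * r - 1) (2 * r - 3)
        ((PySem.List.pyRange 3 (r + 1)).map (fun j => (2 * r - 2 * j + 1) ^ 2)) true) := by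
  have hfg : ∀ i : Int, 3 ≤ i →
      (fun i => 2 * lamv p q i + (2 * r - 2 * i + 1)) i = (fun i => 2 * r - 2 * i + 1) i := by
    intro i h3
    simp only [lamv, if_neg (by omega : ¬i = 1), if_neg (by omega : ¬i = 2)]
    ring
  have htail : ((PySem.List.pyRange 3 (r + 1)).map (fun j => (2 * r - 2 * j + 1) ^ 2))
      = ((PySem.List.pyRange 3 (r + 1)).map (fun j => (fun i => 2 * r - 2 * i + 1) j ^ 2)) := rfl
  rw [dimB_abs p q r hr,
    pairProd_split _ (fun i => 2 * r - 2 * i + 1) r hr hfg,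
    pairProd_split (fun i => 2 * r - 2 * i + 1) (fun i => 2 * r - 2 * i + 1) r hr (fun _ _ => rfl),
    diagProd_split _ (fun i => 2 * r - 2 * i + 1) r hr hfg,
    diagProd_split (fun i => 2 * r - 2 * i + 1) (fun i => 2 * r - 2 * i + 1) r hr (fun _ _ => rfl),
    htail, altNum_closed, altNum_closed]
  rw [if_pos rfl, if_pos rfl,
    show lamv p q 1 = p from by norm_num [lamv],
    show lamv p q 2 = q from by norm_num [lamv],
    show (2:Int) * r - 2 * 1 + 1 = 2 * r - 1 from by ring,
    show (2:Int) * r - 2 * 2 + 1 = 2 * r - 3 from by ring]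
  refine floordiv_eq_of_factor _ _ _ _
      (restProd (fun i => 2 * r - 2 * i + 1) r * tailProd (fun i => 2 * r - 2 * i + 1) r)
      (by ring) (by ring) ?_ ?_
  · refine mul_pos (mul_pos (mul_pos ?_ ?_) ?_) ?_
    · nlinarith [hr]
    · exact colProd_pos _ _ _ (fun j h3 hjr => by nlinarith [h3, hjr, hr])
    · exact colProd_pos _ _ _ (fun j h3 hjr => by nlinarith [h3, hjr, hr])
    · nlinarith [hr]
  · exact mul_pos
      (restProd_pos _ _ (fun i j h3 hij hj => by nlinarith [h3, hij, hj]))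
      (tailProd_pos _ _ (fun j h3 hj => by omega))

theorem dimD_eq (p q r : Int) (hr : 3 ≤ r) :
    dim_D p q r = PySem.Int.floordiv
      (altNum (1 * p + (r - 1)) (1 * q + (r - 2))
        ((PySem.List.pyRange 3 (r + 1)).map (fun j => (r - j) ^ 2)) false)
      (altNum (r - 1) (r - 2)
        ((PySem.List.pyRange 3 (r + 1)).map (fun j => (r - j) ^ 2)) false) := by
  have hfg : ∀ i : Int, 3 ≤ i →
      (fun i => lamv p q i + (r - i)) i = (fun i => r - i) i := by
    intro i h3
    simp only [lamv, if_neg (by omega : ¬i = 1), if_neg (by omega : ¬i = 2)]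
    ring
  have htail : ((PySem.List.pyRange 3 (r + 1)).map (fun j => (r - j) ^ 2))
      = ((PySem.List.pyRange 3 (r + 1)).map (fun j => (fun i => r - i) j ^ 2)) := rfl
  rw [dimD_abs p q r (by omega),
    pairProd_split _ (fun i => r - i) r (by omega) hfg,
    pairProd_split (fun i => r - i) (fun i => r - i) r (by omega) (fun _ _ => rfl),
    htail, altNum_closed, altNum_closed]
  rw [if_neg (show ¬(false = true) from by simp), if_neg (show ¬(false = true) from by simp)]
  rw [show lamv p q 1 = p from by norm_num [lamv],
    show lamv p q 2 = q from by norm_num [lamv],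
    show (1:Int) * p + (r - 1) = p + (r - 1) from by ring,
    show (1:Int) * q + (r - 2) = q + (r - 2) from by ring]
  refine floordiv_eq_of_factor _ _ _ _ (restProd (fun i => r - i) r)
      (by ring) (by ring) ?_ ?_
  · refine mul_pos (mul_pos (mul_pos ?_ ?_) ?_) ?_
    · nlinarith [hr]
    · exact colProd_pos _ _ _ (fun j h3 hjr => by nlinarith [h3, hjr, hr])
    · exact colProd_pos _ _ _ (fun j h3 hjr => by nlinarith [h3, hjr, hr])
    · norm_num
  · exact restProd_pos _ _ (fun i j h3 hij hj => by nlinarith [h3, hij, hj])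

-- ===== VERDICT (by name: the statement is the Claim_ definition above) =====
theorem build_spectrum_spec : Claim_equal_build_spectrum := by
  intro n P_max hdom hpre
  unfold Spec_build_spectrum
  by_cases hP : P_max ≤ 0
  · simp only [build_spectrum, build_spectrum_alt, PySem.List.pyRange_one_eq_nil hP, if_pos hP,
      List.foldl_nil]
    rfl
  · have hn : 3 ≤ n := hpre.resolve_left hP
    simp only [build_spectrum, build_spectrum_alt, if_neg hP]
    by_cases hodd : PySem.Int.mod (n + 2) 2 = 1
    · have hr2 : 2 ≤ PySem.Int.floordiv (n + 2 - 1) 2 := by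
        rw [PySem.Int.floordiv_eq_ediv_of_pos (by norm_num : (0:Int) < 2)]
        omega
      have hdim : ∀ p q : Int, dim_SO p q (n + 2) = PySem.Int.floordiv
          (altNum (2 * p + (2 * PySem.Int.floordiv (n + 2 - 1) 2 - 1))
            (2 * q + (2 * PySem.Int.floordiv (n + 2 - 1) 2 - 3))
            ((PySem.List.pyRange 3 (PySem.Int.floordiv (n + 2 - 1) 2 + 1)).map
              (fun j => (2 * PySem.Int.floordiv (n + 2 - 1) 2 - 2 * j + 1) ^ 2)) true)
          (altNum (2 * PySem.Int.floordiv (n + 2 - 1) 2 - 1)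
            (2 * PySem.Int.floordiv (n + 2 - 1) 2 - 3)
            ((PySem.List.pyRange 3 (PySem.Int.floordiv (n + 2 - 1) 2 + 1)).map
              (fun j => (2 * PySem.Int.floordiv (n + 2 - 1) 2 - 2 * j + 1) ^ 2)) true) := by
        intro p q
        rw [dim_SO, if_pos hodd]
        exact dimB_eq p q _ hr2
      rw [if_pos hodd]
      dsimp only
      simp only [hdim]
    · have hmod : (n + 2) % 2 = 0 := by
        have := PySem.Int.mod_eq_emod_of_pos (a := n + 2) (by norm_num : (0:Int) < 2)
        omega
      have hr3 : 3 ≤ PySem.Int.floordiv (n + 2) 2 := by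
        rw [PySem.Int.floordiv_eq_ediv_of_pos (by norm_num : (0:Int) < 2)]
        omega
      have hdim : ∀ p q : Int, dim_SO p q (n + 2) = PySem.Int.floordiv
          (altNum (1 * p + (PySem.Int.floordiv (n + 2) 2 - 1))
            (1 * q + (PySem.Int.floordiv (n + 2) 2 - 2))
            ((PySem.List.pyRange 3 (PySem.Int.floordiv (n + 2) 2 + 1)).map
              (fun j => (PySem.Int.floordiv (n + 2) 2 - j) ^ 2)) false)
          (altNum (PySem.Int.floordiv (n + 2) 2 - 1)
            (PySem.Int.floordiv (n + 2) 2 - 2)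
            ((PySem.List.pyRange 3 (PySem.Int.floordiv (n + 2) 2 + 1)).map
              (fun j => (PySem.Int.floordiv (n + 2) 2 - j) ^ 2)) false) := by
        intro p q
        rw [dim_SO, if_neg hodd]
        exact dimD_eq p q _ hr3
      rw [if_neg hodd]
      dsimp only
      simp only [hdim]
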